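-- pv_equiv track=rewrite | github.com/MariaCHelena/Exercicios-APC | est_rep.py | sinuquera
-- ===== SOURCE A (Python) =====
-- def sinuquera(n):
--     n -= 1
--     i = 1
--     soma = 0
--     while i < n:
--         soma += 1
--         i += 1
--         n -= 1
--     return soma
-- ===== SOURCE B (Python) =====
-- def sinuquera(n):
--     # closed form: number of loop steps is max(0, (n-1)//2)
--     return max(0, (n - 1) // 2)
-- ===== Notes on version B (the rewrite author's own statement) =====
-- stated objective: faster
-- what changed: replaced the two-sided convergence loop by the closed form max(0, (n-1)//2)
import Mathlib
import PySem

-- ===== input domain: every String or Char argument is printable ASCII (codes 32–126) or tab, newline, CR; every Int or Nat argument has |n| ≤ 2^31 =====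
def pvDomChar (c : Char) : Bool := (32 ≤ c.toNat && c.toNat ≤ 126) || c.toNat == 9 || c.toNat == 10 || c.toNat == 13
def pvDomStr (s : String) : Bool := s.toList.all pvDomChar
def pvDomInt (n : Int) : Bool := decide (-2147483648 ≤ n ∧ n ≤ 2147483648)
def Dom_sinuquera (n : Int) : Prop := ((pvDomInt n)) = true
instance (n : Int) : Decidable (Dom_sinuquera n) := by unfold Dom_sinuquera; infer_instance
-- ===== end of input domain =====

-- B replaces A's loop by the closed form max(0, (n-1)//2): O(1) instead of O(n).

-- ===== PORT A =====
-- the while loop: while i < n: soma += 1; i += 1; n -= 1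
def sinuqueraLoop (i n soma : Int) : Int :=
  if i < n then sinuqueraLoop (i + 1) (n - 1) (soma + 1) else soma
termination_by (n - i).toNat
decreasing_by omega

def sinuquera (n : Int) : Int := sinuqueraLoop 1 (n - 1) 0

-- ===== PORT B =====
def sinuquera_alt (n : Int) : Int := max 0 (PySem.Int.floordiv (n - 1) 2)

-- ===== PRECONDITION & SPEC =====
def Spec_sinuquera (n : Int) (out : Int) : Prop := out = sinuquera_alt n
instance (n : Int) (out : Int) : Decidable (Spec_sinuquera n out) := by unfold Spec_sinuquera; infer_instance

-- ===== CLAIM (what is proved, stated in full; the proofs are below) =====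
def Claim_equal_sinuquera : Prop := ∀ (n : Int), Dom_sinuquera n → Spec_sinuquera n (sinuquera n)

-- ===== LEMMAS AND PROOFS =====
theorem sinuqueraLoop_eq (i n soma : Int) :
    sinuqueraLoop i n soma = soma + max 0 ((n - i + 1) / 2) := by
  induction i, n, soma using sinuqueraLoop.induct with
  | case1 i n soma h ih =>
    rw [sinuqueraLoop, if_pos h, ih]
    have : (n - 1 - (i + 1) + 1) = (n - i + 1) - 2 := by ring
    rw [this]
    omega
  | case2 i n soma h =>
    rw [sinuqueraLoop, if_neg h]
    omega

-- ===== VERDICT (by name: the statement is the Claim_ definition above) =====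
theorem sinuquera_spec : Claim_equal_sinuquera := by
  intro n _
  unfold Spec_sinuquera sinuquera sinuquera_alt
  rw [sinuqueraLoop_eq, PySem.Int.floordiv_eq_ediv_of_pos (by omega)]
  omega
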